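-- pv_equiv track=rewrite | github.com/vadim-vj/wh | syllabuses/cs/problems/cracking-the-code/_.py | cracking_the_code_letter_first
-- ===== SOURCE A (Python) =====
-- def cracking_the_code_letter_first(pin):
--     count = 0
--
--     for c in range(ord('a'), ord('z') + 1):
--         for i in range(100):
--             count += 1
--
--             if pin == chr(c) + f'{i:02d}':
--                 return count
--
--     return count
-- ===== SOURCE B (Python) =====
-- def cracking_the_code_letter_first(pin):
--     # Closed-form inverse of the enumeration: no loops.
--     if (isinstance(pin, str) and len(pin) == 3
--             and 'a' <= pin[0] <= 'z'
--             and '0' <= pin[1] <= '9'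
--             and '0' <= pin[2] <= '9'):
--         return (ord(pin[0]) - ord('a')) * 100 + (ord(pin[1]) - ord('0')) * 10 + (ord(pin[2]) - ord('0')) + 1
--     return 2600
-- ===== Notes on version B (the rewrite author's own statement) =====
-- stated objective: simpler
-- what changed: replaces the 26x100 enumeration loop with a closed-form index formula guarded by a direct character-range check of the pin
import Mathlib
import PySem

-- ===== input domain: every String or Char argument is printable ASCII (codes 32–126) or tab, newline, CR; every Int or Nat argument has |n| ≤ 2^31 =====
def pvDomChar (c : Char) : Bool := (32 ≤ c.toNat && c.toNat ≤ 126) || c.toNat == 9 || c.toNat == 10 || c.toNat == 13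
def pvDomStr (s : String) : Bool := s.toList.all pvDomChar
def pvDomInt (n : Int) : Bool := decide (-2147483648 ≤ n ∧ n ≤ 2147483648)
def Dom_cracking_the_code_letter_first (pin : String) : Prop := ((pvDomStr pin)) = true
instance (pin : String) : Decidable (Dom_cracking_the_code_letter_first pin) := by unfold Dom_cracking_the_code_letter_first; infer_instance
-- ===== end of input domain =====

-- B replaces A's 2600-iteration double enumeration loop by a closed-form index formula
-- guarded by a direct character-range check of the 3-character pin (objective: simpler).

-- ===== PORT A =====
-- f'{i:02d}' for 0 ≤ i < 100: zero-pad to two digits (exact on that range)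
def pvFmt2 (i : Int) : List Char := if i < 10 then '0' :: PySem.Int.toChars i else PySem.Int.toChars i

-- inner 'for i in range(100)' loop; string equality ported as equality of character lists
def pvInner (pin : String) (c : Int) : List Int → Int → Int × Option Int
  | [], count => (count, none)
  | i :: rest, count =>
      let count := count + 1
      if pin.toList = Char.ofNat c.toNat :: pvFmt2 i then (count, some count)
      else pvInner pin c rest count

-- outer "for c in range(ord('a'), ord('z') + 1)" loop
def pvOuter (pin : String) : List Int → Int → Int × Option Int
  | [], count => (count, none)
  | c :: rest, count =>
      match pvInner pin c (PySem.List.pyRange 0 100 1) count with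
      | (count', some r) => (count', some r)
      | (count', none) => pvOuter pin rest count'

def cracking_the_code_letter_first (pin : String) : Int :=
  match pvOuter pin (PySem.List.pyRange 97 123 1) 0 with
  | (_, some r) => r
  | (count, none) => count

-- ===== PORT B =====
def cracking_the_code_letter_first_alt (pin : String) : Int :=
  match pin.toList with
  | [a, d1, d2] =>
      if ('a' ≤ a ∧ a ≤ 'z') ∧ ('0' ≤ d1 ∧ d1 ≤ '9') ∧ ('0' ≤ d2 ∧ d2 ≤ '9') then
        ((a.toNat - 97 : Int)) * 100 + ((d1.toNat - 48 : Int)) * 10 + ((d2.toNat - 48 : Int)) + 1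
      else 2600
  | _ => 2600

-- ===== PRECONDITION & SPEC =====
def Spec_cracking_the_code_letter_first (pin : String) (out : Int) : Prop := out = cracking_the_code_letter_first_alt pin
instance (pin : String) (out : Int) : Decidable (Spec_cracking_the_code_letter_first pin out) := by unfold Spec_cracking_the_code_letter_first; infer_instance

-- ===== CLAIM (what is proved, stated in full; the proofs are below) =====
def Claim_equal_cracking_the_code_letter_first : Prop := ∀ (pin : String), Dom_cracking_the_code_letter_first pin → Spec_cracking_the_code_letter_first pin (cracking_the_code_letter_first pin)

-- ===== LEMMAS AND PROOFS =====

-- the candidate string of iteration (c, i), as a character list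
def pvCand (c i : Int) : List Char := Char.ofNat c.toNat :: pvFmt2 i

lemma pvToNat_ofNat (n : Nat) (h : n < 128) : (Char.ofNat n).toNat = n := by
  unfold Char.ofNat
  rw [dif_pos (Or.inl (by omega : n < 0xd800))]
  rfl

lemma pvFmt2_char : ∀ i ∈ PySem.List.pyRange 0 100 1,
    pvFmt2 i = [Char.ofNat (48 + i.toNat / 10), Char.ofNat (48 + i.toNat % 10)] := by
  decide

lemma pvCand_eq (c i : Int) (hi : i ∈ PySem.List.pyRange 0 100 1) :
    pvCand c i = [Char.ofNat c.toNat, Char.ofNat (48 + i.toNat / 10), Char.ofNat (48 + i.toNat % 10)] := by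
  simp [pvCand, pvFmt2_char i hi]

lemma pvInner_none (pin : String) (c : Int) (is : List Int) (count : Int)
    (h : ∀ i ∈ is, pin.toList ≠ pvCand c i) :
    pvInner pin c is count = (count + is.length, none) := by
  induction is generalizing count with
  | nil => simp [pvInner]
  | cons i rest ih =>
      have hne := h i (by simp)
      simp only [pvInner, if_neg (by simpa [pvCand] using hne)]
      rw [ih _ (fun j hj => h j (by simp [hj]))]
      simp only [List.length_cons]
      congr 1
      push_cast
      ring

lemma pvInner_append (pin : String) (c : Int) (pre l : List Int) (count : Int)
    (h : ∀ i ∈ pre, pin.toList ≠ pvCand c i) :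
    pvInner pin c (pre ++ l) count = pvInner pin c l (count + pre.length) := by
  induction pre generalizing count with
  | nil => simp
  | cons i rest ih =>
      have hne := h i (by simp)
      simp only [List.cons_append, pvInner, if_neg (by simpa [pvCand] using hne)]
      rw [ih _ (fun j hj => h j (by simp [hj]))]
      congr 1
      simp only [List.length_cons]
      push_cast
      ring

lemma pvInner_hit (pin : String) (c : Int) (i : Int) (l : List Int) (count : Int)
    (h : pin.toList = pvCand c i) :
    pvInner pin c (i :: l) count = (count + 1, some (count + 1)) := by
  simp only [pvInner, if_pos (by simpa [pvCand] using h)]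

lemma pvOuter_none (pin : String) (cs : List Int) (count : Int)
    (h : ∀ c ∈ cs, ∀ i ∈ PySem.List.pyRange 0 100 1, pin.toList ≠ pvCand c i) :
    pvOuter pin cs count = (count + 100 * cs.length, none) := by
  induction cs generalizing count with
  | nil => simp [pvOuter]
  | cons c rest ih =>
      simp only [pvOuter]
      rw [pvInner_none pin c _ count (h c (by simp))]
      simp only [PySem.List.length_pyRange_one]
      rw [ih _ (fun c' hc' => h c' (by simp [hc']))]
      simp only [List.length_cons]
      congr 1
      push_cast
      ring

lemma pvOuter_append (pin : String) (pre l : List Int) (count : Int)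
    (h : ∀ c ∈ pre, ∀ i ∈ PySem.List.pyRange 0 100 1, pin.toList ≠ pvCand c i) :
    pvOuter pin (pre ++ l) count = pvOuter pin l (count + 100 * pre.length) := by
  induction pre generalizing count with
  | nil => simp
  | cons c rest ih =>
      simp only [List.cons_append, pvOuter]
      rw [pvInner_none pin c _ count (h c (by simp))]
      simp only [PySem.List.length_pyRange_one]
      rw [ih _ (fun c' hc' => h c' (by simp [hc']))]
      congr 1
      simp only [List.length_cons]
      push_cast
      ring

-- mismatch of a pattern pin with a candidate from a different iteration
lemma pvCand_ne (a d1 d2 : Char) (c i : Int)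
    (hc : c ∈ PySem.List.pyRange 97 123 1) (hi : i ∈ PySem.List.pyRange 0 100 1)
    (hne : ¬ (c = (a.toNat : Int) ∧ i = (((d1.toNat - 48) * 10 + (d2.toNat - 48) : Nat) : Int))) :
    [a, d1, d2] ≠ pvCand c i := by
  rw [pvCand_eq c i hi]
  intro h
  have hcb := PySem.List.mem_pyRange_one.mp hc
  have hib := PySem.List.mem_pyRange_one.mp hi
  have h1 : a = Char.ofNat c.toNat := by injection h
  have h2 : d1 = Char.ofNat (48 + i.toNat / 10) := by injection h with _ h'; injection h'
  have h3 : d2 = Char.ofNat (48 + i.toNat % 10) := by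
    injection h with _ h'; injection h' with _ h''; injection h''
  apply hne
  have e1 : a.toNat = c.toNat := by rw [h1]; exact pvToNat_ofNat _ (by omega)
  have e2 : d1.toNat = 48 + i.toNat / 10 := by rw [h2]; exact pvToNat_ofNat _ (by omega)
  have e3 : d2.toNat = 48 + i.toNat % 10 := by rw [h3]; exact pvToNat_ofNat _ (by omega)
  constructor <;> omega

lemma pvMain_pattern (pin : String) (a d1 d2 : Char)
    (hl : pin.toList = [a, d1, d2])
    (ha : 97 ≤ a.toNat ∧ a.toNat ≤ 122) (hd1 : 48 ≤ d1.toNat ∧ d1.toNat ≤ 57)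
    (hd2 : 48 ≤ d2.toNat ∧ d2.toNat ≤ 57) :
    cracking_the_code_letter_first pin =
      ((a.toNat - 97 : Int)) * 100 + ((d1.toNat - 48 : Int)) * 10 + ((d2.toNat - 48 : Int)) + 1 := by
  set c0 : Int := (a.toNat : Int) with hc0
  set i0 : Int := (((d1.toNat - 48) * 10 + (d2.toNat - 48) : Nat) : Int) with hi0
  have hc0r : c0 ∈ PySem.List.pyRange 97 123 1 :=
    PySem.List.mem_pyRange_one.mpr (by omega)
  have hi0r : i0 ∈ PySem.List.pyRange 0 100 1 :=
    PySem.List.mem_pyRange_one.mpr (by omega)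
  -- pin equals the candidate of iteration (c0, i0)
  have hmatch : pin.toList = pvCand c0 i0 := by
    rw [hl, pvCand_eq _ _ hi0r]
    have hv : i0.toNat = (d1.toNat - 48) * 10 + (d2.toNat - 48) := by omega
    have e2 : 48 + i0.toNat / 10 = d1.toNat := by omega
    have e3 : 48 + i0.toNat % 10 = d2.toNat := by omega
    have e1 : c0.toNat = a.toNat := by omega
    rw [e1, e2, e3, Char.ofNat_toNat, Char.ofNat_toNat, Char.ofNat_toNat]
  -- split the ranges at the match point
  have houter : PySem.List.pyRange 97 123 1 =
      PySem.List.pyRange 97 c0 1 ++ c0 :: PySem.List.pyRange (c0 + 1) 123 1 := by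
    have h2 : PySem.List.pyRange c0 123 1 = c0 :: PySem.List.pyRange (c0 + 1) 123 1 :=
      PySem.List.pyRange_one_cons (by omega)
    rw [PySem.List.pyRange_one_append 97 c0 123 (by omega) (by omega), h2]
  have hinner : PySem.List.pyRange 0 100 1 =
      PySem.List.pyRange 0 i0 1 ++ i0 :: PySem.List.pyRange (i0 + 1) 100 1 := by
    have h2 : PySem.List.pyRange i0 100 1 = i0 :: PySem.List.pyRange (i0 + 1) 100 1 :=
      PySem.List.pyRange_one_cons (by omega)
    rw [PySem.List.pyRange_one_append 0 i0 100 (by omega) (by omega), h2]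
  have hpremiss : ∀ c ∈ PySem.List.pyRange 97 c0 1,
      ∀ i ∈ PySem.List.pyRange 0 100 1, pin.toList ≠ pvCand c i := by
    intro c hc i hi
    have hcb := PySem.List.mem_pyRange_one.mp hc
    rw [hl]
    refine pvCand_ne a d1 d2 c i (PySem.List.mem_pyRange_one.mpr (by omega)) hi ?_
    rintro ⟨rfl, -⟩
    omega
  have hpremiss_i : ∀ i ∈ PySem.List.pyRange 0 i0 1, pin.toList ≠ pvCand c0 i := by
    intro i hi
    have hib := PySem.List.mem_pyRange_one.mp hi
    rw [hl]
    refine pvCand_ne a d1 d2 c0 i hc0r (PySem.List.mem_pyRange_one.mpr (by omega)) ?_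
    rintro ⟨-, h⟩
    omega
  unfold cracking_the_code_letter_first
  rw [houter, pvOuter_append pin _ _ 0 hpremiss]
  simp only [pvOuter]
  rw [hinner, pvInner_append pin c0 _ _ _ hpremiss_i, pvInner_hit pin c0 i0 _ _ hmatch]
  simp only [PySem.List.length_pyRange_one]
  omega

lemma pvMain_nopattern (pin : String)
    (h : ∀ a d1 d2 : Char, pin.toList = [a, d1, d2] →
      ¬ ((97 ≤ a.toNat ∧ a.toNat ≤ 122) ∧ (48 ≤ d1.toNat ∧ d1.toNat ≤ 57) ∧ (48 ≤ d2.toNat ∧ d2.toNat ≤ 57))) :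
    cracking_the_code_letter_first pin = 2600 := by
  have hmiss : ∀ c ∈ PySem.List.pyRange 97 123 1,
      ∀ i ∈ PySem.List.pyRange 0 100 1, pin.toList ≠ pvCand c i := by
    intro c hc i hi heq
    have hcb := PySem.List.mem_pyRange_one.mp hc
    have hib := PySem.List.mem_pyRange_one.mp hi
    rw [pvCand_eq c i hi] at heq
    apply h _ _ _ heq
    have e1 : (Char.ofNat c.toNat).toNat = c.toNat := pvToNat_ofNat _ (by omega)
    have e2 : (Char.ofNat (48 + i.toNat / 10)).toNat = 48 + i.toNat / 10 := pvToNat_ofNat _ (by omega)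
    have e3 : (Char.ofNat (48 + i.toNat % 10)).toNat = 48 + i.toNat % 10 := pvToNat_ofNat _ (by omega)
    rw [e1, e2, e3]
    omega
  unfold cracking_the_code_letter_first
  rw [pvOuter_none pin _ 0 hmiss]
  simp [PySem.List.length_pyRange_one]

-- ===== VERDICT (by name: the statement is the Claim_ definition above) =====
theorem cracking_the_code_letter_first_spec : Claim_equal_cracking_the_code_letter_first := by
  intro pin _
  unfold Spec_cracking_the_code_letter_first
  by_cases hpat : ∃ a d1 d2 : Char, pin.toList = [a, d1, d2] ∧
      (97 ≤ a.toNat ∧ a.toNat ≤ 122) ∧ (48 ≤ d1.toNat ∧ d1.toNat ≤ 57) ∧ (48 ≤ d2.toNat ∧ d2.toNat ≤ 57)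
  · obtain ⟨a, d1, d2, hl, ha, hd1, hd2⟩ := hpat
    rw [pvMain_pattern pin a d1 d2 hl ha hd1 hd2]
    simp only [cracking_the_code_letter_first_alt, hl]
    rw [if_pos ⟨⟨ha.1, ha.2⟩, ⟨hd1.1, hd1.2⟩, ⟨hd2.1, hd2.2⟩⟩]
  · rw [pvMain_nopattern pin (fun a d1 d2 hl hb => hpat ⟨a, d1, d2, hl, hb⟩)]
    rcases hx : pin.toList with _ | ⟨a, _ | ⟨d1, _ | ⟨d2, _ | _⟩⟩⟩ <;>
      simp only [cracking_the_code_letter_first_alt, hx]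
    have hnb : ¬ (('a' ≤ a ∧ a ≤ 'z') ∧ ('0' ≤ d1 ∧ d1 ≤ '9') ∧ ('0' ≤ d2 ∧ d2 ≤ '9')) :=
      fun hb => hpat ⟨a, d1, d2, hx, hb⟩
    rw [if_neg hnb]
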